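-- pv_equiv track=rewrite | github.com/albertomurillo/advent-of-code | 2023/day15.py | part2
-- ===== SOURCE A (Python) =====
-- from collections import OrderedDict
--
-- def hash_(s: str) -> int:
--     total = 0
--     for c in s:
--         _, total = divmod(((total + ord(c)) * 17), 256)
--     return total
--
-- def part2(data: str):
--     boxes = [OrderedDict() for _ in range(256)]
--
--     for step in data.split(","):
--         if step.endswith("-"):
--             box, _ = step.split("-")
--             if box in boxes[hash_(box)]:
--                 del boxes[hash_(box)][box]
--
--         if "=" in step:
--             box, value = step.split("=")
--             boxes[hash_(box)][box] = value
--
--     total = 0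
--     for i, box in enumerate(boxes, start=1):
--         for j, (_, val) in enumerate(box.items(), start=1):
--             total += i * j * int(val)
--
--     return total
-- ===== SOURCE B (Python) =====
-- def hash_(s: str) -> int:
--     total = 0
--     for c in s:
--         total = ((total + ord(c)) * 17) % 256
--     return total
--
--
-- def part2(data: str):
--     # One flat insertion-ordered map over ALL lenses instead of 256 simulated boxes:
--     # '=' sets label->value (overwrite keeps position), '-' pops the label.
--     # Boxes are reconstructed only at scoring time: walking the map in insertion
--     # order, entries of a box appear in their box order, so a per-box running
--     # counter gives each lens its slot number.
--     lenses = {}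
--     for step in data.split(","):
--         if "=" in step:
--             label, value = step.split("=")
--             lenses[label] = value
--         elif step.endswith("-"):
--             label, _ = step.split("-")
--             lenses.pop(label, None)
--
--     slot = [0] * 256
--     total = 0
--     for label, value in lenses.items():
--         b = hash_(label)
--         slot[b] += 1
--         total += (b + 1) * slot[b] * int(value)
--     return total
-- ===== Notes on version B (the rewrite author's own statement) =====
-- stated objective: alternative
-- what changed: B never simulates the 256 boxes: it keeps ONE flat insertion-ordered map of all lenses (= sets/overwrites, - pops), and reconstructs box order only at scoring time by walking that map once with a per-box running slot counter, replacing A's list-of-256-OrderedDicts simulation and its double enumerate scoring loop.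
-- outside the precondition, e.g. on part2('a=x,a=1'): A returns 114, B returns 114; on part2('a=-,a-'): A returns 0, B returns 0
import Mathlib
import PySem

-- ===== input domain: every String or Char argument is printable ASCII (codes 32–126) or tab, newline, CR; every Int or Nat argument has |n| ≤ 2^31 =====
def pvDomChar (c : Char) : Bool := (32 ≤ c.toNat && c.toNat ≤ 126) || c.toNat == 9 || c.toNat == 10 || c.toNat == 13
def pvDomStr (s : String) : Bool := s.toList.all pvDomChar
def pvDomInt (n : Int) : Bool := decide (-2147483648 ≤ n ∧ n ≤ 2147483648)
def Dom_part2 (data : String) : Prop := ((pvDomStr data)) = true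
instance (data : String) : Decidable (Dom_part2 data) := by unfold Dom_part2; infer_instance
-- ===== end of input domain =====

-- B replaces A's simulation of 256 OrderedDict boxes by ONE flat insertion-ordered map of
-- all lenses (overwrite keeps position, '-' pops) and reconstructs each lens's box slot only
-- at scoring time with per-box running counters; objective: alternative, same cost.


-- ===== PORT A =====
-- hash_ of A: `_, total = divmod(((total + ord(c)) * 17), 256)` keeps only the remainder
def hashA (s : String) : Int :=
  s.toList.foldl (fun total c =>
    ((PySem.Int.divmod? ((total + (c.toNat : Int)) * 17) 256).getD (0, 0)).2) 0

-- one iteration of A's `for step in data.split(",")` loop (two independent `if`s)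
def stepA (boxes : List (PySem.Dict String String)) (step : String) :
    List (PySem.Dict String String) :=
  let boxes :=
    if PySem.Str.endswith step "-" then
      -- `box, _ = step.split("-")` (Python raises unless exactly 2 parts; outside Pre_)
      let box := ((PySem.Str.split? step "-").getD []).headD ""
      if (PySem.List.pyGetD boxes (hashA box) PySem.Dict.empty).contains box then
        PySem.List.pySetD boxes (hashA box)
          ((PySem.List.pyGetD boxes (hashA box) PySem.Dict.empty).erase box)
      else boxes
    else boxes
  if PySem.Str.isIn "=" step then
    -- `box, value = step.split("=")` (Python raises unless exactly 2 parts; outside Pre_)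
    let parts := (PySem.Str.split? step "=").getD []
    let box := parts.headD ""
    let value := (parts.drop 1).headD ""
    PySem.List.pySetD boxes (hashA box)
      ((PySem.List.pyGetD boxes (hashA box) PySem.Dict.empty).insert box value)
  else boxes

-- A's final double loop `for i, box in enumerate(boxes, 1): for j, (_, val) in enumerate(box.items(), 1)`
def scoreA (boxes : List (PySem.Dict String String)) : Int :=
  (PySem.List.enumerate boxes 1).foldl (fun total p =>
    (PySem.List.enumerate p.2.items 1).foldl (fun total q =>
      -- `int(val)`: Python raises ValueError on a non-int literal; outside Pre_
      total + p.1 * q.1 * ((PySem.Int.ofStr? q.2.2).getD 0)) total) 0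

def part2 (data : String) : Int :=
  scoreA (((PySem.Str.split? data ",").getD []).foldl stepA
    ((PySem.List.pyRange 0 256 1).map (fun _ => PySem.Dict.empty)))

-- ===== PORT B =====
def hashB (s : String) : Int :=
  s.toList.foldl (fun total c => PySem.Int.mod ((total + (c.toNat : Int)) * 17) 256) 0

-- B's update loop: one flat map `lenses` over ALL labels ('=' sets, '-' pops)
def stepB (lenses : PySem.Dict String String) (step : String) : PySem.Dict String String :=
  if PySem.Str.isIn "=" step then
    let parts := (PySem.Str.split? step "=").getD []
    lenses.insert (parts.headD "") ((parts.drop 1).headD "")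
  else if PySem.Str.endswith step "-" then
    let label := ((PySem.Str.split? step "-").getD []).headD ""
    -- `lenses.pop(label, None)`: remove the entry if present, discard the value
    match PySem.Dict.pop? lenses label with
    | some (_, d) => d
    | none => lenses
  else lenses

-- body of B's scoring loop: bump this label's box counter, add its term
def scoreStep (st : List Int × Int) (p : String × String) : List Int × Int :=
  let b := hashB p.1
  let slot := PySem.List.pySetD st.1 b (PySem.List.pyGetD st.1 b 0 + 1)
  (slot, st.2 + (b + 1) * PySem.List.pyGetD slot b 0 * ((PySem.Int.ofStr? p.2).getD 0))

-- `slot = [0]*256; for label, value in lenses.items(): ...`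
def scoreB (lenses : PySem.Dict String String) : Int :=
  (lenses.items.foldl scoreStep (List.replicate 256 (0 : Int), (0 : Int))).2

def part2_alt (data : String) : Int :=
  scoreB (((PySem.Str.split? data ",").getD []).foldl stepB PySem.Dict.empty)

-- ===== PRECONDITION & SPEC =====
-- Pre_ excludes malformed steps on which A raises ValueError at tuple unpacking (a dash-final
-- step with a second dash, an assignment step with a second equals sign), and assignment steps
-- whose value is not an int literal (A raises ValueError at scoring unless that entry is later
-- overwritten or removed — there A returns and B agrees, so Pre_ is slightly narrower than A's
-- exact domain); an assignment step ending in a dash is excluded with them, since its value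
-- (ending in a dash) can never parse as an int.
def Pre_part2 (data : String) : Prop :=
  ∀ step ∈ (PySem.Str.split? data ",").getD [],
    (PySem.Str.endswith step "-" = true → PySem.Str.count step "-" = 1) ∧
    (PySem.Str.isIn "=" step = true →
      PySem.Str.endswith step "-" = false ∧
      PySem.Str.count step "=" = 1 ∧
      (PySem.Int.ofStr?
        ((((PySem.Str.split? step "=").getD []).drop 1).headD "")).isSome = true)
instance (data : String) : Decidable (Pre_part2 data) := by unfold Pre_part2; infer_instance

def pvWitness_part2 : String := "rn=1,cm-,qp=3,cm=2,qp-"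

def Spec_part2 (data : String) (out : Int) : Prop := out = part2_alt data
instance (data : String) (out : Int) : Decidable (Spec_part2 data out) := by
  unfold Spec_part2; infer_instance

-- ===== CLAIM (what is proved, stated in full; the proofs are below) =====
def Claim_equal_part2 : Prop :=
  ∀ (data : String), Dom_part2 data → Pre_part2 data → Spec_part2 data (part2 data)

-- ===== LEMMAS AND PROOFS =====

theorem pvHash_eq (s : String) : hashA s = hashB s := by
  unfold hashA hashB
  refine PySem.List.foldl_congr_mem _ _ _ _ (fun acc c _ => ?_)
  simp [PySem.Int.divmod?, PySem.Int.mod]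

theorem pvHash_lb (s : String) : 0 ≤ hashB s := by
  unfold hashB
  induction s.toList using List.reverseRecOn with
  | nil => simp
  | append_singleton xs x ih =>
      simp only [List.foldl_append, List.foldl_cons, List.foldl_nil]
      exact PySem.Int.mod_nonneg _ (by norm_num)

theorem pvHash_ub (s : String) : hashB s < 256 := by
  unfold hashB
  induction s.toList using List.reverseRecOn with
  | nil => simp
  | append_singleton xs x ih =>
      simp only [List.foldl_append, List.foldl_cons, List.foldl_nil]
      exact PySem.Int.mod_lt _ (by norm_num)

-- the bucket of box `b`: the entries of the flat map whose label hashes to `b`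
def pvFilt (b : Nat) (M : List (String × String)) : List (String × String) :=
  M.filter (fun p => hashB p.1 == (b : Int))

-- reconstruction of A's boxes from B's flat map
def projBox (L : PySem.Dict String String) (b : Nat) : PySem.Dict String String :=
  PySem.Dict.mk (pvFilt b L.items)

def proj (L : PySem.Dict String String) : List (PySem.Dict String String) :=
  (List.range 256).map (projBox L)

theorem length_proj (L : PySem.Dict String String) : (proj L).length = 256 := by
  simp [proj]

theorem pyGetD_proj (L : PySem.Dict String String) (s : String) :
    PySem.List.pyGetD (proj L) (hashA s) PySem.Dict.empty = projBox L (hashB s).toNat := by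
  have h0 := pvHash_lb s
  have h1 := pvHash_ub s
  rw [pvHash_eq s, PySem.List.pyGetD_eq_getElem _ _ h0 (by rw [length_proj]; omega)]
  simp only [proj, List.getElem_map, List.getElem_range]

theorem pySetD_proj (L : PySem.Dict String String) (s : String)
    (d : PySem.Dict String String) :
    PySem.List.pySetD (proj L) (hashA s) d = (proj L).set (hashB s).toNat d := by
  rw [pvHash_eq s, PySem.List.pySetD_of_nonneg _ _ (pvHash_lb s)]

theorem filt_map_ow (b : Nat) (l v : String) (xs : List (String × String)) :
    pvFilt b (xs.map (fun p => if p.1 == l then (l, v) else p)) =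
      (pvFilt b xs).map (fun p => if p.1 == l then (l, v) else p) := by
  unfold pvFilt
  rw [List.filter_map]
  congr 1
  refine List.filter_congr (fun p _ => ?_)
  by_cases h : p.1 = l <;> simp [Function.comp, h]

theorem map_ow_id (l v : String) (xs : List (String × String))
    (h : ∀ p ∈ xs, p.1 ≠ l) :
    xs.map (fun p => if p.1 == l then (l, v) else p) = xs := by
  induction xs with
  | nil => rfl
  | cons e rest ih =>
      have he : (e.1 == l) = false := by simpa using h e (by simp)
      rw [List.map_cons, he, if_neg (by simp), ih (fun p hp => h p (by simp [hp]))]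

theorem no_key_in_filt (b : Nat) (l : String) (hb : hashB l ≠ (b : Int)) :
    ∀ xs : List (String × String), ∀ p ∈ pvFilt b xs, p.1 ≠ l := by
  intro xs p hp hpl
  have := List.of_mem_filter hp
  rw [hpl] at this
  simp only [beq_iff_eq] at this
  exact hb this

theorem any_filter_key (l : String) (P : String × String → Bool)
    (hP : ∀ p : String × String, p.1 = l → P p = true) :
    ∀ xs : List (String × String),
      (xs.filter P).any (fun p => p.1 == l) = xs.any (fun p => p.1 == l) := by
  intro xs
  induction xs with
  | nil => rfl
  | cons x r ih =>
      rw [List.filter_cons]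
      by_cases hx : x.1 = l
      · rw [if_pos (hP x hx)]; simp [ih]
      · by_cases hPx : P x = true
        · rw [if_pos hPx]; simp [hx, ih]
        · rw [if_neg hPx]; simp [hx, ih]

theorem contains_projBox (L : PySem.Dict String String) (l : String)
    (hb : hashB l = ((hashB l).toNat : Int)) :
    (projBox L (hashB l).toNat).contains l = L.contains l := by
  have h1 : (projBox L (hashB l).toNat).contains l =
      (pvFilt (hashB l).toNat L.items).any (fun p => p.1 == l) := rfl
  have h2 : L.contains l = L.items.any (fun p => p.1 == l) := rfl
  rw [h1, h2]
  unfold pvFilt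
  exact any_filter_key l _ (fun p hp => by simp [hp, ← hb]) L.items

-- the per-step fact the equivalence proof uses: the two branches are mutually exclusive
def PreStep (step : String) : Prop :=
  PySem.Str.isIn "=" step = true → PySem.Str.endswith step "-" = false

theorem nodup_keys_erase (d : PySem.Dict String String) (k : String)
    (hnd : d.keys.Nodup) : (d.erase k).keys.Nodup := by
  have h : (List.filter (fun p => !(p.1 == k)) d.items).Sublist d.items :=
    List.filter_sublist
  show ((d.erase k).items.map Prod.fst).Nodup
  exact List.Nodup.sublist (List.Sublist.map Prod.fst h) hnd

-- '=' branch: reconstructed boxes commute with a flat-map insert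
theorem proj_insert (L : PySem.Dict String String) (l v : String) :
    (proj L).set (hashB l).toNat ((projBox L (hashB l).toNat).insert l v) =
      proj (L.insert l v) := by
  have h0 := pvHash_lb l
  have h1 := pvHash_ub l
  have hcast : ((hashB l).toNat : Int) = hashB l := Int.toNat_of_nonneg h0
  apply List.ext_getElem
  · simp [proj]
  · intro b hb hb'
    simp only [proj, List.length_map, List.length_range] at hb'
    simp only [proj, List.getElem_map, List.getElem_range]
    by_cases hbe : b = (hashB l).toNat
    · subst hbe
      rw [List.getElem_set_self (by simp; omega)]
      apply PySem.Dict.ext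
      rw [PySem.Dict.items_insert]
      have hc := contains_projBox L l hcast.symm
      by_cases hLc : L.contains l = true
      · rw [if_pos (by rw [hc]; exact hLc)]
        show _ = pvFilt _ (L.insert l v).items
        rw [PySem.Dict.items_insert, if_pos hLc, filt_map_ow]
        rfl
      · rw [if_neg (by rw [hc]; exact hLc)]
        show _ = pvFilt _ (L.insert l v).items
        rw [PySem.Dict.items_insert, if_neg hLc]
        unfold pvFilt
        have hone : List.filter (fun p => hashB p.1 == (((hashB l).toNat : Nat) : Int)) [(l, v)] = [(l, v)] := by
          simp [hcast]
        rw [List.filter_append, hone]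
        rfl
    · rw [List.getElem_set_ne (by omega)]
      simp only [List.getElem_map, List.getElem_range]
      apply PySem.Dict.ext
      show pvFilt b L.items = pvFilt b (L.insert l v).items
      have hbne : hashB l ≠ (b : Int) := by
        intro h; apply hbe; omega
      rw [PySem.Dict.items_insert]
      by_cases hLc : L.contains l = true
      · rw [if_pos hLc, filt_map_ow, map_ow_id _ _ _ (no_key_in_filt b l hbne L.items)]
      · rw [if_neg hLc]
        unfold pvFilt
        rw [List.filter_append]
        simp [hbne]

-- '-' branch: reconstructed boxes commute with a flat-map erase
theorem proj_erase (L : PySem.Dict String String) (l : String) :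
    (proj L).set (hashB l).toNat ((projBox L (hashB l).toNat).erase l) =
      proj (L.erase l) := by
  have h0 := pvHash_lb l
  have h1 := pvHash_ub l
  apply List.ext_getElem
  · simp [proj]
  · intro b hb hb'
    simp only [proj, List.length_map, List.length_range] at hb'
    simp only [proj, List.getElem_map, List.getElem_range]
    by_cases hbe : b = (hashB l).toNat
    · subst hbe
      rw [List.getElem_set_self (by simp; omega)]
      apply PySem.Dict.ext
      show List.filter _ (pvFilt _ L.items) = pvFilt _ (List.filter _ L.items)
      unfold pvFilt
      rw [List.filter_filter, List.filter_filter]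
      congr 1
      funext p
      exact Bool.and_comm _ _
    · rw [List.getElem_set_ne (by omega)]
      simp only [List.getElem_map, List.getElem_range]
      apply PySem.Dict.ext
      show pvFilt b L.items = pvFilt b (List.filter _ L.items)
      have hbne : hashB l ≠ (b : Int) := by
        intro h; apply hbe; omega
      unfold pvFilt
      rw [List.filter_filter]
      refine (List.filter_congr (fun p _ => ?_)).symm
      by_cases hpl : p.1 = l
      · have : (hashB p.1 == (b : Int)) = false := by
          simp [hpl, hbne]
        simp [this]
      · simp [hpl]

theorem step_sim (step : String) (hpre : PreStep step)
    (L : PySem.Dict String String) (hnd : L.keys.Nodup) :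
    stepA (proj L) step = proj (stepB L step) ∧ (stepB L step).keys.Nodup := by
  simp only [stepA, stepB]
  cases hin : PySem.Str.isIn "=" step with
  | true =>
      have hends : PySem.Str.endswith step "-" = false := hpre hin
      simp only [hends, Bool.false_eq_true, if_false, if_true]
      set l := ((PySem.Str.split? step "=").getD []).headD "" with hl
      set v := ((((PySem.Str.split? step "=").getD []).drop 1)).headD "" with hv
      refine ⟨?_, PySem.Dict.nodup_keys_insert _ _ _ hnd⟩
      rw [pyGetD_proj, pySetD_proj]
      exact proj_insert L l v
  | false =>
      cases hends : PySem.Str.endswith step "-" with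
      | true =>
          simp only [Bool.false_eq_true, if_false, if_true]
          set l := ((PySem.Str.split? step "-").getD []).headD "" with hl
          have hcast : ((hashB l).toNat : Int) = hashB l := Int.toNat_of_nonneg (pvHash_lb l)
          rw [pyGetD_proj]
          have hc := contains_projBox L l hcast.symm
          cases hLc : L.contains l with
          | true =>
              rw [hc, hLc]
              simp only [if_true]
              obtain ⟨w, hw⟩ : ∃ w, L.get? l = some w := by
                have := PySem.Dict.contains_eq_isSome_get? (d := L) (k := l)
                rw [hLc] at this
                exact Option.isSome_iff_exists.mp this.symm
              rw [PySem.Dict.pop?, hw]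
              simp only [Option.map_some]
              refine ⟨?_, nodup_keys_erase L l hnd⟩
              rw [pySetD_proj]
              exact proj_erase L l
          | false =>
              rw [hc, hLc]
              simp only [Bool.false_eq_true, if_false]
              have hg : L.get? l = none := by
                have := PySem.Dict.contains_eq_isSome_get? (d := L) (k := l)
                rw [hLc] at this
                cases hgl : L.get? l with
                | none => rfl
                | some w => rw [hgl] at this; simp at this
              rw [PySem.Dict.pop?, hg]
              simp only [Option.map_none]
              exact ⟨trivial, hnd⟩
      | false =>
          simp only [Bool.false_eq_true, if_false]
          exact ⟨trivial, hnd⟩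


theorem fold_sim (steps : List String) (hpre : ∀ s ∈ steps, PreStep s) :
    ∀ L : PySem.Dict String String, L.keys.Nodup →
    steps.foldl stepA (proj L) = proj (steps.foldl stepB L) := by
  induction steps with
  | nil => intro L _; rfl
  | cons s rest ih =>
      intro L hnd
      obtain ⟨h1, h2⟩ := step_sim s (hpre s (by simp)) L hnd
      rw [List.foldl_cons, List.foldl_cons, h1]
      exact ih (fun t ht => hpre t (by simp [ht])) _ h2

-- ==== scoring ====

-- score of one box with multiplier i, starting after slot s
def gB (i : Int) : Int → List (String × String) → Int
  | _, [] => 0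
  | s, p :: r => i * (s + 1) * ((PySem.Int.ofStr? p.2).getD 0) + gB i (s + 1) r

theorem innerA_eq (i : Int) (items : List (String × String)) :
    ∀ (s t0 : Int),
      (PySem.List.enumerate items (s + 1)).foldl
        (fun t q => t + i * q.1 * ((PySem.Int.ofStr? q.2.2).getD 0)) t0 =
        t0 + gB i s items := by
  induction items with
  | nil => intro s t0; simp [PySem.List.enumerate, gB]
  | cons p r ih =>
      intro s t0
      show (PySem.List.enumerate (p :: r) (s + 1)).foldl _ _ = _
      rw [show PySem.List.enumerate (p :: r) (s + 1) =
        (s + 1, p) :: PySem.List.enumerate r (s + 1 + 1) from rfl]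
      rw [List.foldl_cons]
      rw [ih (s + 1)]
      show t0 + i * (s + 1) * _ + gB i (s + 1) r = t0 + gB i s (p :: r)
      rw [show gB i s (p :: r) =
        i * (s + 1) * ((PySem.Int.ofStr? p.2).getD 0) + gB i (s + 1) r from rfl]
      ring

theorem enumerate_map {α β : Type} (f : α → β) (l : List α) (s : Int) :
    PySem.List.enumerate (l.map f) s =
      (PySem.List.enumerate l s).map (fun p => (p.1, f p.2)) := by
  induction l generalizing s with
  | nil => rfl
  | cons x t ih => simp [PySem.List.enumerate, ih]

theorem enumerate_append {α : Type} (xs ys : List α) (s : Int) :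
    PySem.List.enumerate (xs ++ ys) s =
      PySem.List.enumerate xs s ++ PySem.List.enumerate ys (s + xs.length) := by
  induction xs generalizing s with
  | nil => simp [PySem.List.enumerate]
  | cons x t ih =>
      simp only [List.cons_append, PySem.List.enumerate, ih, List.length_cons]
      congr 2
      push_cast
      ring_nf

theorem enumerate_range (n : Nat) :
    PySem.List.enumerate (List.range n) 1 =
      (List.range n).map (fun b : Nat => ((b : Int) + 1, b)) := by
  induction n with
  | zero => rfl
  | succ m ih =>
      rw [List.range_succ, enumerate_append, ih, List.map_append, List.length_range]
      congr 1
      show (1 + (m : Int), m) :: ([] : List (Int × Nat)) = [((m : Int) + 1, m)]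
      rw [Int.add_comm]

theorem scoreA_sum (boxes : List (PySem.Dict String String)) :
    scoreA boxes =
      ((PySem.List.enumerate boxes 1).map (fun p => gB p.1 0 p.2.items)).sum := by
  unfold scoreA
  rw [PySem.List.foldl_congr_mem _ _
    (fun (total : Int) (p : Int × PySem.Dict String String) => total + gB p.1 0 p.2.items)
    0 (fun acc p _ => by
      have := innerA_eq p.1 p.2.items 0 acc
      rw [show (0 : Int) + 1 = 1 from rfl] at this
      exact this)]
  rw [PySem.List.foldl_add]
  simp

-- the flat-map scoring loop computes the sum over buckets of per-box scores
theorem loopB_sum (M : List (String × String)) :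
    ∀ (c : List Int) (t : Int), c.length = 256 →
    (M.foldl scoreStep (c, t)).2 =
      t + ∑ b ∈ Finset.range 256, gB ((b : Int) + 1) (c.getD b 0) (pvFilt b M) := by
  induction M with
  | nil =>
      intro c t hc
      simp [pvFilt, gB]
  | cons p r ih =>
      intro c t hc
      have h0 := pvHash_lb p.1
      have h1 := pvHash_ub p.1
      have hcast : (((hashB p.1).toNat : Nat) : Int) = hashB p.1 := Int.toNat_of_nonneg h0
      have hlt : (hashB p.1).toNat < 256 := by omega
      rw [List.foldl_cons]
      rw [show scoreStep (c, t) p =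
        (PySem.List.pySetD c (hashB p.1) (PySem.List.pyGetD c (hashB p.1) 0 + 1),
          t + (hashB p.1 + 1) *
            PySem.List.pyGetD (PySem.List.pySetD c (hashB p.1) (PySem.List.pyGetD c (hashB p.1) 0 + 1)) (hashB p.1) 0 *
            ((PySem.Int.ofStr? p.2).getD 0)) from rfl]
      have hget : PySem.List.pyGetD c (hashB p.1) 0 = c.getD (hashB p.1).toNat 0 := by
        rw [PySem.List.pyGetD_eq_getElem _ _ h0 (by omega), List.getD_eq_getElem _ _ (by omega)]
      have hset : PySem.List.pySetD c (hashB p.1) (PySem.List.pyGetD c (hashB p.1) 0 + 1) =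
          c.set (hashB p.1).toNat (c.getD (hashB p.1).toNat 0 + 1) := by
        rw [PySem.List.pySetD_of_nonneg _ _ h0, hget]
      have hlen' : (c.set (hashB p.1).toNat (c.getD (hashB p.1).toNat 0 + 1)).length = 256 := by
        simp [hc]
      have hget' : PySem.List.pyGetD (PySem.List.pySetD c (hashB p.1) (PySem.List.pyGetD c (hashB p.1) 0 + 1)) (hashB p.1) 0 =
          c.getD (hashB p.1).toNat 0 + 1 := by
        rw [hset, PySem.List.pyGetD_eq_getElem _ _ h0 (by rw [hlen']; omega)]
        rw [List.getElem_set_self (by rw [List.length_set]; omega)]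
      rw [hget', hset]
      rw [ih _ _ hlen']
      -- split both sums at the index (hashB p.1).toNat
      have hmem : (hashB p.1).toNat ∈ Finset.range 256 := Finset.mem_range.mpr hlt
      rw [← Finset.add_sum_erase _ _ hmem, ← Finset.add_sum_erase _ _ hmem]
      have hsame : ∀ b ∈ (Finset.range 256).erase (hashB p.1).toNat,
          gB ((b : Int) + 1) ((c.set (hashB p.1).toNat (c.getD (hashB p.1).toNat 0 + 1)).getD b 0) (pvFilt b r) =
            gB ((b : Int) + 1) (c.getD b 0) (pvFilt b (p :: r)) := by
        intro b hbm
        obtain ⟨hbne, hbr⟩ := Finset.mem_erase.mp hbm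
        have hblt := Finset.mem_range.mp hbr
        have hfilt : pvFilt b (p :: r) = pvFilt b r := by
          unfold pvFilt
          rw [List.filter_cons]
          have : (hashB p.1 == (b : Int)) = false := by
            simp only [beq_eq_false_iff_ne, ne_eq]
            intro h; apply hbne; omega
          simp [this]
        have hgd : (c.set (hashB p.1).toNat (c.getD (hashB p.1).toNat 0 + 1)).getD b 0 = c.getD b 0 := by
          have hb1 : b < (c.set (hashB p.1).toNat (c.getD (hashB p.1).toNat 0 + 1)).length := by
            rw [hlen']; omega
          have hb2 : b < c.length := by omega
          rw [List.getD_eq_getElem _ 0 hb1, List.getD_eq_getElem _ 0 hb2]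
          exact List.getElem_set_ne (by omega) hb1
        rw [hfilt, hgd]
      rw [Finset.sum_congr rfl hsame]
      have hhead : pvFilt (hashB p.1).toNat (p :: r) = p :: pvFilt (hashB p.1).toNat r := by
        unfold pvFilt
        rw [List.filter_cons]
        have hT : (hashB p.1 == (((hashB p.1).toNat : Nat) : Int)) = true :=
          beq_iff_eq.mpr hcast.symm
        rw [if_pos hT]
      have hgd2 : (c.set (hashB p.1).toNat (c.getD (hashB p.1).toNat 0 + 1)).getD (hashB p.1).toNat 0 =
          c.getD (hashB p.1).toNat 0 + 1 := by
        have hb1 : (hashB p.1).toNat < (c.set (hashB p.1).toNat (c.getD (hashB p.1).toNat 0 + 1)).length := by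
          rw [hlen']; omega
        rw [List.getD_eq_getElem _ 0 hb1]
        exact List.getElem_set_self hb1
      rw [hhead, hgd2]
      rw [show gB (((hashB p.1).toNat : Int) + 1) (c.getD (hashB p.1).toNat 0) (p :: pvFilt (hashB p.1).toNat r) =
        (((hashB p.1).toNat : Int) + 1) * (c.getD (hashB p.1).toNat 0 + 1) * ((PySem.Int.ofStr? p.2).getD 0) +
          gB (((hashB p.1).toNat : Int) + 1) (c.getD (hashB p.1).toNat 0 + 1) (pvFilt (hashB p.1).toNat r) from rfl]
      rw [hcast]
      ring

theorem sum_range_map {f : Nat → Int} (n : Nat) :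
    ((List.range n).map f).sum = ∑ b ∈ Finset.range n, f b := by
  induction n with
  | zero => rfl
  | succ m ih => rw [List.range_succ, List.map_append, List.sum_append,
      Finset.sum_range_succ, ih]; simp

theorem score_eq (L : PySem.Dict String String) : scoreA (proj L) = scoreB L := by
  rw [scoreA_sum]
  unfold proj
  rw [enumerate_map, enumerate_range, List.map_map, List.map_map]
  unfold scoreB
  rw [loopB_sum L.items (List.replicate 256 0) 0 (by rw [List.length_replicate])]
  rw [sum_range_map]
  simp only [Function.comp, projBox, zero_add]
  refine Finset.sum_congr rfl (fun b hb => ?_)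
  have hb1 : b < (List.replicate 256 (0 : Int)).length := by
    rw [List.length_replicate]; exact Finset.mem_range.mp hb
  have hz : (List.replicate 256 (0 : Int)).getD b 0 = 0 := by
    rw [List.getD_eq_getElem _ 0 hb1, List.getElem_replicate]
  rw [hz]

theorem init_proj :
    ((PySem.List.pyRange 0 256 1).map
        (fun _ => (PySem.Dict.empty : PySem.Dict String String))) = proj PySem.Dict.empty := by
  apply List.ext_getElem
  · rw [List.length_map, PySem.List.length_pyRange_one, length_proj]; decide
  · intro b hb hb'
    simp only [List.getElem_map, proj, List.getElem_range]
    rfl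

-- ===== VERDICT (by name: the statement is the Claim_ definition above) =====
theorem part2_spec : Claim_equal_part2 := by
  intro data _ hpre
  unfold Spec_part2 part2 part2_alt
  have hpre' : ∀ s ∈ (PySem.Str.split? data ",").getD [], PreStep s := by
    intro s hs hin
    exact ((hpre s hs).2 hin).1
  rw [init_proj, fold_sim _ hpre' PySem.Dict.empty PySem.Dict.nodup_keys_empty, score_eq]
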